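-- pv_equiv track=rewrite | github.com/rafeerahman/Anonymizer | backend/anonymizer/common/util.py | dict_converter
-- ===== SOURCE A (Python) =====
-- def dict_converter(huggingfacedict: dict, autoreplaceTerms: dict):
--     d = {}
--     keys = huggingfacedict.keys()
--     if "names" in autoreplaceTerms:
--         for k in keys:
--             if huggingfacedict[k] == "PER":
--                 d[k] = autoreplaceTerms["names"]
--     if "org" in autoreplaceTerms:
--         for k in keys:
--             if huggingfacedict[k] == "ORG":
--                 d[k] = autoreplaceTerms["org"]
--     if "location" in autoreplaceTerms:
--         for k in keys:
--             if huggingfacedict[k] == "LOC":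
--                 d[k] = autoreplaceTerms["location"]
--
--     return d
-- ===== SOURCE B (Python) =====
-- def dict_converter(huggingfacedict: dict, autoreplaceTerms: dict):
--     # one pass: partition keys by label
--     per, org, loc = [], [], []
--     for k, label in huggingfacedict.items():
--         if label == "PER":
--             per.append(k)
--         elif label == "ORG":
--             org.append(k)
--         elif label == "LOC":
--             loc.append(k)
--     d = {}
--     if "names" in autoreplaceTerms:
--         term = autoreplaceTerms["names"]
--         for k in per:
--             d[k] = term
--     if "org" in autoreplaceTerms:
--         term = autoreplaceTerms["org"]
--         for k in org:
--             d[k] = term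
--     if "location" in autoreplaceTerms:
--         term = autoreplaceTerms["location"]
--         for k in loc:
--             d[k] = term
--     return d
-- ===== Notes on version B (the rewrite author's own statement) =====
-- stated objective: simpler
-- what changed: One partitioning pass over huggingfacedict.items() collecting PER/ORG/LOC keys into three ordered lists, then the result dict is emitted bucket by bucket, instead of A's three full scans over the keys with a lookup per key.
import Mathlib
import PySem

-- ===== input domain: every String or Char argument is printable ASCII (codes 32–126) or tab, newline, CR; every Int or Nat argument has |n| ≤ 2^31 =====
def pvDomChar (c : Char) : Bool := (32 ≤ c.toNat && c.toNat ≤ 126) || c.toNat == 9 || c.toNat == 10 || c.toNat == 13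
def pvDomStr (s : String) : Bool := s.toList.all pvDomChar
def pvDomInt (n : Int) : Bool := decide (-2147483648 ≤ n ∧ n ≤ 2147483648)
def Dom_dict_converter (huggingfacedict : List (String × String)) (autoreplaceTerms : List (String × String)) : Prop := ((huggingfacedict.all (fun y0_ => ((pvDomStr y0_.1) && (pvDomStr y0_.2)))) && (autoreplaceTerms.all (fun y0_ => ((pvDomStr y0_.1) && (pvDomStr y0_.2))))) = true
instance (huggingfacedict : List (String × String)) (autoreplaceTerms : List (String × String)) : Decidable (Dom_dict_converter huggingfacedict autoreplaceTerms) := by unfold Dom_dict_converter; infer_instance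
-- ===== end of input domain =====

-- B replaces A's three scans over the keys (one per label, each with a per-key lookup) by a single
-- partitioning pass over the items followed by emitting the three buckets; objective: simpler.

-- ===== PORT A =====
def dict_converter (huggingfacedict : List (String × String)) (autoreplaceTerms : List (String × String)) : List (String × String) :=
  let hd := PySem.Dict.mk huggingfacedict
  let ar := PySem.Dict.mk autoreplaceTerms
  let d : PySem.Dict String String := PySem.Dict.empty
  let keys := hd.keys
  let d := if ar.contains "names" = true then
      keys.foldl (fun d k => if hd.getD k "" == "PER" then d.insert k (ar.getD "names" "") else d) d
    else d
  let d := if ar.contains "org" = true then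
      keys.foldl (fun d k => if hd.getD k "" == "ORG" then d.insert k (ar.getD "org" "") else d) d
    else d
  let d := if ar.contains "location" = true then
      keys.foldl (fun d k => if hd.getD k "" == "LOC" then d.insert k (ar.getD "location" "") else d) d
    else d
  d.items

-- ===== PORT B =====
def dict_converter_alt (huggingfacedict : List (String × String)) (autoreplaceTerms : List (String × String)) : List (String × String) :=
  let ar := PySem.Dict.mk autoreplaceTerms
  let buckets := huggingfacedict.foldl
    (fun (acc : List String × List String × List String) p =>
      if p.2 == "PER" then (acc.1 ++ [p.1], acc.2.1, acc.2.2)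
      else if p.2 == "ORG" then (acc.1, acc.2.1 ++ [p.1], acc.2.2)
      else if p.2 == "LOC" then (acc.1, acc.2.1, acc.2.2 ++ [p.1])
      else acc) ([], [], [])
  let d : PySem.Dict String String := PySem.Dict.empty
  let d := if ar.contains "names" = true then
      buckets.1.foldl (fun d k => d.insert k (ar.getD "names" "")) d
    else d
  let d := if ar.contains "org" = true then
      buckets.2.1.foldl (fun d k => d.insert k (ar.getD "org" "")) d
    else d
  let d := if ar.contains "location" = true then
      buckets.2.2.foldl (fun d k => d.insert k (ar.getD "location" "")) d
    else d
  d.items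

-- ===== PRECONDITION & SPEC =====
-- Pre_ excludes association lists whose huggingfacedict part has duplicate keys: those represent no
-- Python dict (the duplicates collapse before A ever runs), so A's first-match reading of them is accidental.
def Pre_dict_converter (huggingfacedict : List (String × String)) (autoreplaceTerms : List (String × String)) : Prop :=
  (huggingfacedict.map Prod.fst).Nodup
instance (huggingfacedict : List (String × String)) (autoreplaceTerms : List (String × String)) : Decidable (Pre_dict_converter huggingfacedict autoreplaceTerms) := by unfold Pre_dict_converter; infer_instance
def pvWitness_dict_converter : (List (String × String)) × (List (String × String)) :=
  ([("Alice", "PER"), ("Acme", "ORG"), ("Paris", "LOC")], [("names", "NAME"), ("org", "ORG0")])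
def Spec_dict_converter (huggingfacedict : List (String × String)) (autoreplaceTerms : List (String × String)) (out : List (String × String)) : Prop := out = dict_converter_alt huggingfacedict autoreplaceTerms
instance (huggingfacedict : List (String × String)) (autoreplaceTerms : List (String × String)) (out : List (String × String)) : Decidable (Spec_dict_converter huggingfacedict autoreplaceTerms out) := by unfold Spec_dict_converter; infer_instance

-- ===== CLAIM (what is proved, stated in full; the proofs are below) =====
def Claim_equal_dict_converter : Prop := ∀ (huggingfacedict : List (String × String)) (autoreplaceTerms : List (String × String)), Dom_dict_converter huggingfacedict autoreplaceTerms → Pre_dict_converter huggingfacedict autoreplaceTerms → Spec_dict_converter huggingfacedict autoreplaceTerms (dict_converter huggingfacedict autoreplaceTerms)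

-- ===== LEMMAS AND PROOFS =====

-- B's single partitioning pass computes the three label-filtered key lists.
theorem buckets_eq (hf : List (String × String)) (a b c : List String) :
    hf.foldl (fun (acc : List String × List String × List String) p =>
      if p.2 == "PER" then (acc.1 ++ [p.1], acc.2.1, acc.2.2)
      else if p.2 == "ORG" then (acc.1, acc.2.1 ++ [p.1], acc.2.2)
      else if p.2 == "LOC" then (acc.1, acc.2.1, acc.2.2 ++ [p.1])
      else acc) (a, b, c)
    = (a ++ (hf.filter (fun p => p.2 == "PER")).map Prod.fst,
       b ++ (hf.filter (fun p => p.2 == "ORG")).map Prod.fst,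
       c ++ (hf.filter (fun p => p.2 == "LOC")).map Prod.fst) := by
  induction hf generalizing a b c with
  | nil => simp
  | cons p t ih =>
    simp only [List.foldl_cons, List.filter_cons]
    split_ifs with h1 h2 h3 <;>
      simp_all [ih, List.map_cons, List.append_assoc]

-- A's scan over the keys with a per-key lookup equals a direct fold over the label-filtered key list.
theorem pass_eq (hf : List (String × String)) (hnd : (hf.map Prod.fst).Nodup)
    (L t : String) (d : PySem.Dict String String) :
    (PySem.Dict.mk hf).keys.foldl
      (fun d k => if (PySem.Dict.mk hf).getD k "" == L then d.insert k t else d) d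
    = ((hf.filter (fun p => p.2 == L)).map Prod.fst).foldl (fun d k => d.insert k t) d := by
  rw [← List.foldl_filter]
  have hkeys : (PySem.Dict.mk hf).keys = hf.map Prod.fst := by
    simp [PySem.Dict.keys]
  rw [hkeys, List.filter_map]
  congr 1
  have : ∀ p ∈ hf, ((PySem.Dict.mk hf).getD p.1 "" == L) = (p.2 == L) := by
    intro p hp
    have hget : (PySem.Dict.mk hf).getD p.1 "" = p.2 := by
      apply PySem.Dict.getD_of_mem_items
      · exact hp
      · simpa [PySem.Dict.keys] using hnd
    simp [Function.comp, hget]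
  congr 1
  exact List.filter_congr (fun p hp => by simpa [Function.comp] using this p hp)

-- ===== VERDICT (by name: the statement is the Claim_ definition above) =====
theorem dict_converter_spec : Claim_equal_dict_converter := by
  intro hf at_ _ hpre
  unfold Spec_dict_converter dict_converter dict_converter_alt
  simp only [buckets_eq hf [] [] [], List.nil_append]
  rw [pass_eq hf hpre "PER" _, pass_eq hf hpre "ORG" _, pass_eq hf hpre "LOC" _]
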